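-- pv_equiv track=rewrite | github.com/jesusllg/BASS-Branching-Architecture-Search-Space-for-Deep-Super-Resolution | Implementation/encoding.py | bstr_to_rstr
-- ===== SOURCE A (Python) =====
-- def gray_to_int(gray_code):
--     """
--     Convert a Gray code string to an integer.
--
--     Args:
--         gray_code (str): Gray code string.
--
--     Returns:
--         int: Corresponding integer value.
--     """
--     binary_bits = [int(gray_code[0])]
--     for i in range(1, len(gray_code)):
--         next_bit = int(gray_code[i]) ^ binary_bits[i - 1]
--         binary_bits.append(next_bit)
--     binary_str = ''.join(str(bit) for bit in binary_bits)
--     return int(binary_str, 2)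
--
-- def bstr_to_rstr(bstring):
--     """
--     Convert a binary string to a list of integers by interpreting every 3 bits.
--
--     Args:
--         bstring (str): Binary string.
--
--     Returns:
--         list: List of integers representing operation indices.
--     """
--     rstr = []
--     for i in range(0, len(bstring), 3):
--         segment = bstring[i:i+3]
--         if len(segment) < 3:
--             segment = segment.ljust(3, '0')  # Pad with zeros if needed
--         r = gray_to_int(segment)
--         rstr.append(r)
--     return rstr
-- ===== SOURCE B (Python) =====
-- _TABLE = {'000': 0, '001': 1, '010': 3, '011': 2,
--           '100': 7, '101': 6, '110': 4, '111': 5}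
--
-- def bstr_to_rstr(bstring):
--     return [_TABLE[(bstring[i:i+3] + '00')[:3]] for i in range(0, len(bstring), 3)]
-- ===== Notes on version B (the rewrite author's own statement) =====
-- stated objective: simpler
-- what changed: Replaces the per-bit XOR-accumulation loop (bit list, string join, int(s,2)) with a precomputed 8-entry table mapping each 3-bit Gray chunk to its integer, looked up once per chunk of a single comprehension.
import Mathlib
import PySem

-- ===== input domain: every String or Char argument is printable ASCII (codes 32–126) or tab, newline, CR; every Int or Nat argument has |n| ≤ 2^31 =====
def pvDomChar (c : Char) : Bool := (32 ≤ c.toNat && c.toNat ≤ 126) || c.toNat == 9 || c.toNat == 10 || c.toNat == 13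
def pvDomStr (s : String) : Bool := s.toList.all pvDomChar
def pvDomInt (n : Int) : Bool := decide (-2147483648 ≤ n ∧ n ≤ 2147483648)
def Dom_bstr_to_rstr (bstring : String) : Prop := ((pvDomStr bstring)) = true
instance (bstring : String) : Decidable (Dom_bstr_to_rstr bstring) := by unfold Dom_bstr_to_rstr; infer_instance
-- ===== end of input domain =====

-- B replaces A's per-bit XOR loop + string join + int(_,2) with a precomputed 8-entry
-- gray-decode table looked up once per 3-bit chunk (objective: simpler).

-- ===== PORT A =====
-- int(c) for a digit character (A only reaches this on '0'/'1' under Pre_)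
def pyDigitInt (c : Char) : Int := (c.toNat : Int) - 48

-- gray_to_int, over the chunk as a list of characters
def gray_to_int (gray_code : List Char) : Int :=
  let binary_bits : List Int := [pyDigitInt (PySem.List.pyGetD gray_code 0 ' ')]
  let binary_bits :=
    (PySem.List.pyRange 1 (gray_code.length : Int) 1).foldl
      (fun bs i =>
        bs ++ [Int.xor (pyDigitInt (PySem.List.pyGetD gray_code i ' '))
                       (PySem.List.pyGetD bs (i - 1) 0)])
      binary_bits
  -- ''.join(str(bit) for bit in binary_bits), then int(binary_str, 2)
  let binary_chars : List Char := binary_bits.flatMap (fun b => (PySem.Int.toStr b).toList)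
  binary_chars.foldl (fun acc c => 2 * acc + pyDigitInt c) 0

def bstr_to_rstr (bstring : String) : List Int :=
  let l := bstring.toList
  (PySem.List.pyRange 0 (l.length : Int) 3).foldl
    (fun rstr i =>
      let segment := PySem.List.slice l (some i) (some (i + 3))
      let segment :=
        if segment.length < 3 then segment ++ List.replicate (3 - segment.length) '0'
        else segment  -- segment.ljust(3, '0')
      rstr ++ [gray_to_int segment])
    []

-- ===== PORT B =====
def grayTable : PySem.Dict (List Char) Int :=
  PySem.Dict.ofList
    [(['0','0','0'], 0), (['0','0','1'], 1), (['0','1','0'], 3), (['0','1','1'], 2),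
     (['1','0','0'], 7), (['1','0','1'], 6), (['1','1','0'], 4), (['1','1','1'], 5)]

def bstr_to_rstr_alt (bstring : String) : List Int :=
  let l := bstring.toList
  (PySem.List.pyRange 0 (l.length : Int) 3).map
    (fun i =>
      -- _TABLE[(bstring[i:i+3] + '00')[:3]]  (KeyError = none is outside Pre_)
      (PySem.Dict.get? grayTable
        (PySem.List.slice (PySem.List.slice l (some i) (some (i + 3)) ++ ['0','0'])
          none (some 3))).getD 0)

-- ===== PRECONDITION & SPEC =====
-- Pre_: every character is '0' or '1' — on any other character A raises
-- (ValueError from int(c) or int(binary_str, 2)).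
def Pre_bstr_to_rstr (bstring : String) : Prop :=
  (bstring.toList.all (fun c => c == '0' || c == '1')) = true
instance (bstring : String) : Decidable (Pre_bstr_to_rstr bstring) := by
  unfold Pre_bstr_to_rstr; infer_instance

def pvWitness_bstr_to_rstr : String := "1011"

def Spec_bstr_to_rstr (bstring : String) (out : List Int) : Prop := out = bstr_to_rstr_alt bstring
instance (bstring : String) (out : List Int) : Decidable (Spec_bstr_to_rstr bstring out) := by unfold Spec_bstr_to_rstr; infer_instance

-- ===== CLAIM (what is proved, stated in full; the proofs are below) =====
def Claim_equal_bstr_to_rstr : Prop := ∀ (bstring : String), Dom_bstr_to_rstr bstring → Pre_bstr_to_rstr bstring → Spec_bstr_to_rstr bstring (bstr_to_rstr bstring)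

-- ===== LEMMAS AND PROOFS =====

lemma foldl_append_singleton_eq_map (g : Int → Int) (l : List Int) :
    ∀ acc : List Int, l.foldl (fun acc i => acc ++ [g i]) acc = acc ++ l.map g := by
  induction l with
  | nil => intro acc; simp
  | cons x xs ih => intro acc; simp [List.foldl_cons, ih]

-- the per-chunk agreement: on a nonempty binary chunk of length ≤ 3, A's
-- gray_to_int of the padded chunk equals B's table lookup
lemma chunk_agree (s : List Char) (hne : s ≠ []) (hlen : s.length ≤ 3)
    (hbin : ∀ c ∈ s, c = '0' ∨ c = '1') :
    gray_to_int (if s.length < 3 then s ++ List.replicate (3 - s.length) '0' else s)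
      = (PySem.Dict.get? grayTable (PySem.List.slice (s ++ ['0','0']) none (some 3))).getD 0 := by
  match s, hne with
  | [a], _ =>
    rcases hbin a (by simp) with rfl | rfl <;> decide
  | [a, b], _ =>
    rcases hbin a (by simp) with rfl | rfl <;>
      rcases hbin b (by simp) with rfl | rfl <;> decide
  | [a, b, c], _ =>
    rcases hbin a (by simp) with rfl | rfl <;>
      rcases hbin b (by simp) with rfl | rfl <;>
        rcases hbin c (by simp) with rfl | rfl <;> decide
  | _ :: _ :: _ :: _ :: _, _ => simp at hlen; omega

-- ===== VERDICT (by name: the statement is the Claim_ definition above) =====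
theorem bstr_to_rstr_spec : Claim_equal_bstr_to_rstr := by
  intro bstring _ hpre
  unfold Spec_bstr_to_rstr bstr_to_rstr bstr_to_rstr_alt
  set l := bstring.toList with hl
  simp only
  rw [foldl_append_singleton_eq_map, List.nil_append]
  apply List.map_congr_left
  intro i hi
  rw [PySem.List.mem_pyRange_iff_of_pos (by norm_num)] at hi
  obtain ⟨h0, hn, -⟩ := hi
  have hseg : PySem.List.slice l (some i) (some (i + 3))
      = (l.drop i.toNat).take 3 := by
    rw [PySem.List.slice_toNat l h0 (by omega)]
    congr 1
    omega
  set s := PySem.List.slice l (some i) (some (i + 3)) with hs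
  have hne : s ≠ [] := by
    rw [hseg]
    have : i.toNat < l.length := by omega
    simp [List.drop_eq_nil_iff]
    omega
  have hlen : s.length ≤ 3 := by
    rw [hseg]; simp
  have hbin : ∀ c ∈ s, c = '0' ∨ c = '1' := by
    intro c hc
    have := List.all_eq_true.mp hpre c (PySem.List.mem_of_mem_slice l _ _ hc)
    simpa using this
  exact chunk_agree s hne hlen hbin
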